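-- pv_equiv track=rewrite | github.com/aakanksha1dutta/ai-mini-projects | hw3/sat.py | find_pure
-- ===== SOURCE A (Python) =====
-- def find_pure(clauses, assignment):
--     pure = {}
--     deleted = []
--     for clause in clauses:
--         for lit in clause:
--             if lit[0]=='~':
--                 c = lit[1:]
--                 if c in assignment:
--                     continue
--
--                 elif c in pure:
--                     if pure[c]!=False:
--                         del pure[c]
--                         deleted.append(c)
--
--                 elif c not in deleted:
--                     pure[c]=False
--
--             else:
--                 if lit in assignment:
--                     continue
--                 elif lit in pure:
--                     if pure[lit]!=True:
--                         del pure[lit]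
--                         deleted.append(lit)
--                 elif lit not in deleted:
--                     pure[lit]=True
--
--     #add the clause index where index = find(pure)
--     '''listOfRemovals = []
--     for j in range(len(clauses)):'''
--
--
--     return pure
-- ===== SOURCE B (Python) =====
-- def find_pure(clauses, assignment):
--     # accumulate, per unassigned variable, the set of polarities it occurs with;
--     # then keep exactly the variables seen with a single polarity
--     polar = {}
--     for clause in clauses:
--         for lit in clause:
--             if lit.startswith('~'):
--                 var, pol = lit[1:], False
--             else:
--                 var, pol = lit, True
--             if var in assignment:
--                 continue
--             polar.setdefault(var, set()).add(pol)
--     return {var: next(iter(pols)) for var, pols in polar.items() if len(pols) == 1}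
-- ===== Notes on version B (the rewrite author's own statement) =====
-- stated objective: simpler
-- what changed: A incrementally maintains a pure-dict plus a deleted-list with per-literal insert/delete case analysis; B first accumulates, per unassigned variable, the set of polarities it occurs with, then filters that table to the variables seen with exactly one polarity.
-- outside the precondition, e.g. on find_pure([['']], set()): A raises IndexError, B returns {'': True}
import Mathlib
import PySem

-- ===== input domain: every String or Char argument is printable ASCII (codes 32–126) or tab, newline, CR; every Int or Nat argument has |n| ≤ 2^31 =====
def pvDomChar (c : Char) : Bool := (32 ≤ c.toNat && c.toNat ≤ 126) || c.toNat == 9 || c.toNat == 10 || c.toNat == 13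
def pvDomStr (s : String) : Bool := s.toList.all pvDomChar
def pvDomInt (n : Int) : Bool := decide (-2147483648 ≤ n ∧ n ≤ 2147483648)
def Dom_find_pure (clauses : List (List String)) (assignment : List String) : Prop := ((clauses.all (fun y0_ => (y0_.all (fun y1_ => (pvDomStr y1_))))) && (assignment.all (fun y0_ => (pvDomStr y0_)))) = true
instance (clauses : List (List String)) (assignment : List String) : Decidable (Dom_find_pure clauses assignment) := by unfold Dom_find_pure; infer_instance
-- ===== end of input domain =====

-- B replaces A's incremental pure/deleted bookkeeping by an accumulate-then-filter pass
-- (polarity sets per unassigned variable, then keep the single-polarity ones): simpler decomposition.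


-- ===== PORT A =====
-- one iteration of A's inner loop over a literal: state is (pure dict, deleted list)
def fpStepA (assignment : List String) (st : PySem.Dict String Bool × List String) (lit : String) :
    PySem.Dict String Bool × List String :=
  if PySem.Str.pyGet? lit 0 == some '~' then      -- lit[0] == '~'  (IndexError on "" is outside Pre_)
    let c := PySem.Str.slice lit (some 1) none    -- lit[1:]
    if assignment.contains c then st
    else if st.1.contains c then
      (if st.1.getD c false != false then (st.1.erase c, st.2 ++ [c]) else st)   -- pure[c] != False
    else if st.2.contains c then st               -- (negation of 'c not in deleted', branches swapped)
    else (st.1.insert c false, st.2)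
  else
    if assignment.contains lit then st
    else if st.1.contains lit then
      (if st.1.getD lit false != true then (st.1.erase lit, st.2 ++ [lit]) else st)  -- pure[lit] != True
    else if st.2.contains lit then st
    else (st.1.insert lit true, st.2)

def find_pure (clauses : List (List String)) (assignment : List String) : List (String × Bool) :=
  (clauses.foldl (fun st clause => clause.foldl (fpStepA assignment) st)
      (PySem.Dict.empty, ([] : List String))).1.items

-- ===== PORT B =====
-- parse a literal into (variable, polarity)
def fpParse (lit : String) : String × Bool :=
  if PySem.Str.startswith lit "~" then (PySem.Str.slice lit (some 1) none, false) else (lit, true)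

-- record the polarity of one literal: polar.setdefault(var, set()).add(pol)
def fpStepB (assignment : List String) (polar : PySem.Dict String (PySem.Set Bool)) (lit : String) :
    PySem.Dict String (PySem.Set Bool) :=
  let vp := fpParse lit
  if assignment.contains vp.1 then polar
  else polar.modify vp.1 PySem.Set.empty (fun s => PySem.Set.add s vp.2)

-- the final comprehension's body: keep vars with exactly one polarity (headD = next(iter(...)), exact since len = 1)
def fpSel (q : String × PySem.Set Bool) : Option (String × Bool) :=
  if PySem.Set.len q.2 == 1 then some (q.1, q.2.headD false) else none

def find_pure_alt (clauses : List (List String)) (assignment : List String) : List (String × Bool) :=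
  ((clauses.foldl (fun d clause => clause.foldl (fpStepB assignment) d) PySem.Dict.empty).items).filterMap fpSel

-- ===== PRECONDITION & SPEC =====
-- Python A evaluates lit[0] on every literal, so it raises IndexError exactly when some clause
-- contains the empty string; Pre_ excludes only those inputs.
def Pre_find_pure (clauses : List (List String)) (assignment : List String) : Prop :=
  ∀ clause ∈ clauses, ∀ lit ∈ clause, lit ≠ ""
instance (clauses : List (List String)) (assignment : List String) : Decidable (Pre_find_pure clauses assignment) := by unfold Pre_find_pure; infer_instance

def pvWitness_find_pure : List (List String) × List String :=
  ([["p", "~q"], ["p", "r"], ["~r"]], ["r"])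

def Spec_find_pure (clauses : List (List String)) (assignment : List String) (out : List (String × Bool)) : Prop := out = find_pure_alt clauses assignment
instance (clauses : List (List String)) (assignment : List String) (out : List (String × Bool)) : Decidable (Spec_find_pure clauses assignment out) := by unfold Spec_find_pure; infer_instance

-- ===== CLAIM (what is proved, stated in full; the proofs are below) =====
def Claim_equal_find_pure : Prop := ∀ (clauses : List (List String)) (assignment : List String), Dom_find_pure clauses assignment → Pre_find_pure clauses assignment → Spec_find_pure clauses assignment (find_pure clauses assignment)

-- ===== LEMMAS AND PROOFS =====

-- lit[0] == '~' is exactly lit.startswith('~')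
lemma fp_startswith_tilde (lit : String) :
    PySem.Str.startswith lit "~" = (PySem.Str.pyGet? lit 0 == some '~') := by
  have h : "~".toList = ['~'] := by decide
  simp only [PySem.Str.startswith_eq, PySem.Str.pyGet?_eq, PySem.Chars.pyGet?_eq_listPyGet?, h]
  cases hl : lit.toList with
  | nil => rfl
  | cons c cs =>
      simp [PySem.Chars.startswith, PySem.List.pyGet?_zero_cons, List.isPrefixOf, Bool.beq_comm]

-- A's step, rewritten through fpParse (the two symmetric branches collapse)
lemma fpStepA_eq (assignment : List String) (st : PySem.Dict String Bool × List String) (lit : String) :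
    fpStepA assignment st lit =
      (if assignment.contains (fpParse lit).1 then st
       else if st.1.contains (fpParse lit).1 then
         (if st.1.getD (fpParse lit).1 false != (fpParse lit).2
            then (st.1.erase (fpParse lit).1, st.2 ++ [(fpParse lit).1]) else st)
       else if st.2.contains (fpParse lit).1 then st
       else (st.1.insert (fpParse lit).1 (fpParse lit).2, st.2)) := by
  unfold fpStepA fpParse
  rw [fp_startswith_tilde]
  by_cases hc : PySem.List.pyGet? lit.toList 0 = some '~'
  · simp [hc]
  · simp [hc]

-- the possible polarity sets (built from ∅ by Set.add of booleans)
def FPGood (s : PySem.Set Bool) : Prop :=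
  s = [true] ∨ s = [false] ∨ s = [true, false] ∨ s = [false, true]

-- the loop invariant tying A's (pure, deleted) to B's polar table
def FPInv (st : PySem.Dict String Bool × List String) (polar : PySem.Dict String (PySem.Set Bool)) : Prop :=
  polar.keys.Nodup ∧
  (∀ q ∈ polar.items, FPGood q.2) ∧
  st.1.items = polar.items.filterMap fpSel ∧
  (∀ v, v ∈ st.2 ↔ ∃ s, polar.get? v = some s ∧ s.length = 2)

lemma fpSel_eq_some {q : String × PySem.Set Bool} {r : String × Bool} (h : fpSel q = some r) :
    r.1 = q.1 ∧ q.2.length = 1 := by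
  unfold fpSel at h
  split_ifs at h with hlen
  cases h
  refine ⟨rfl, ?_⟩
  have hlen' : (q.2.length : Int) = 1 := by simpa [PySem.Set.len] using hlen
  omega

lemma fpSel_singleton (v : String) (b : Bool) : fpSel (v, [b]) = some (v, b) := by
  simp [fpSel, PySem.Set.len]

lemma fpSel_two (v : String) (s : PySem.Set Bool) (h : s.length = 2) : fpSel (v, s) = none := by
  simp [fpSel, PySem.Set.len, h]

lemma fp_keys_sublist (P : List (String × PySem.Set Bool)) :
    ((P.filterMap fpSel).map Prod.fst).Sublist (P.map Prod.fst) := by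
  induction P with
  | nil => simp
  | cons q P ih =>
      cases h : fpSel q with
      | none =>
          simp only [List.filterMap_cons, h, List.map_cons]
          exact ih.cons q.1
      | some r =>
          have hr := (fpSel_eq_some h).1
          simp only [List.filterMap_cons, h, List.map_cons, hr]
          exact ih.cons₂ q.1

lemma fp_map_replace_self (P : List (String × PySem.Set Bool)) (v : String) (t : PySem.Set Bool)
    (h : ∀ q ∈ P, q.1 = v → q.2 = t) :
    P.map (fun q => if q.1 == v then (v, t) else q) = P := by
  induction P with
  | nil => rfl
  | cons q P ih =>
      have ih' := ih (fun r hr => h r (List.mem_cons_of_mem q hr))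
      simp only [List.map_cons, ih']
      by_cases hq : q.1 = v
      · have ht := h q (List.mem_cons_self) hq
        have hq' : q = (v, t) := by
          cases q; simp_all
        simp [hq, hq']
      · simp [hq]

lemma fp_filterMap_replace (P : List (String × PySem.Set Bool)) (v : String) (t : PySem.Set Bool)
    (ht : fpSel (v, t) = none) :
    (P.map (fun q => if q.1 == v then (v, t) else q)).filterMap fpSel
      = (P.filterMap fpSel).filter (fun r => !(r.1 == v)) := by
  induction P with
  | nil => rfl
  | cons q P ih =>
      simp only [List.map_cons, List.filterMap_cons]
      by_cases hq : q.1 = v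
      · have hfq : (if (q.1 == v) = true then (v, t) else q) = (v, t) := by simp [hq]
        rw [hfq, ht]
        cases h : fpSel q with
        | none => exact ih
        | some r =>
            have hr := (fpSel_eq_some h).1
            show List.filterMap fpSel (List.map (fun q => if (q.1 == v) = true then (v, t) else q) P)
              = List.filter (fun r => !(r.1 == v)) (r :: List.filterMap fpSel P)
            rw [ih]
            simp [List.filter_cons, hr, hq]
      · have hfq : (if (q.1 == v) = true then (v, t) else q) = q := by simp [hq]
        rw [hfq]
        cases h : fpSel q with
        | none => exact ih
        | some r =>
            have hr := (fpSel_eq_some h).1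
            show r :: List.filterMap fpSel (List.map (fun q => if (q.1 == v) = true then (v, t) else q) P)
              = List.filter (fun r => !(r.1 == v)) (r :: List.filterMap fpSel P)
            rw [ih]
            simp [List.filter_cons, hr, hq]

lemma fp_pure_nodup (pure : PySem.Dict String Bool) (polar : PySem.Dict String (PySem.Set Bool))
    (hpure : pure.items = polar.items.filterMap fpSel) (hnd : polar.keys.Nodup) :
    pure.keys.Nodup := by
  have hkeys : pure.keys = (polar.items.filterMap fpSel).map Prod.fst := by
    simp [PySem.Dict.keys, hpure]
  rw [hkeys]
  exact List.Nodup.sublist (fp_keys_sublist polar.items) (by simpa [PySem.Dict.keys] using hnd)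

lemma fp_pure_contains (pure : PySem.Dict String Bool) (polar : PySem.Dict String (PySem.Set Bool))
    (hpure : pure.items = polar.items.filterMap fpSel) (v : String) (b : Bool)
    (hm : (v, [b]) ∈ polar.items) : pure.contains v = true := by
  have hb : (v, b) ∈ pure.items := by
    rw [hpure]; exact List.mem_filterMap.mpr ⟨(v, [b]), hm, fpSel_singleton v b⟩
  rw [PySem.Dict.contains_eq_decide_mem_keys]
  simp only [decide_eq_true_eq, PySem.Dict.keys, List.mem_map]
  exact ⟨(v, b), hb, rfl⟩

lemma fp_pure_not_contains (pure : PySem.Dict String Bool) (polar : PySem.Dict String (PySem.Set Bool))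
    (hpure : pure.items = polar.items.filterMap fpSel) (hnd : polar.keys.Nodup) (v : String)
    (s : PySem.Set Bool) (hget : polar.get? v = some s) (hlen : s.length = 2) :
    pure.contains v = false := by
  rw [PySem.Dict.contains_eq_decide_mem_keys]
  simp only [decide_eq_false_iff_not, PySem.Dict.keys, List.mem_map]
  rintro ⟨r, hr, hr1⟩
  rw [hpure] at hr
  obtain ⟨q, hq, hsel⟩ := List.mem_filterMap.mp hr
  obtain ⟨hrq, hq2⟩ := fpSel_eq_some hsel
  have hq1 : q.1 = v := by rw [← hrq, hr1]
  have hh : polar.get? q.1 = some q.2 :=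
    (PySem.Dict.get?_eq_some_iff_mem_items polar q.1 q.2 hnd).mpr (by cases q; exact hq)
  rw [hq1, hget] at hh
  have hsq : s = q.2 := by injection hh
  rw [hsq] at hlen
  omega

lemma fpStep_inv (assignment : List String) (st : PySem.Dict String Bool × List String)
    (polar : PySem.Dict String (PySem.Set Bool)) (lit : String) (h : FPInv st polar) :
    FPInv (fpStepA assignment st lit) (fpStepB assignment polar lit) := by
  obtain ⟨hnd, hgood, hpure, hdel⟩ := h
  obtain ⟨pure, del⟩ := st
  simp only at hpure hdel
  rw [fpStepA_eq]
  unfold fpStepB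
  simp only [PySem.Dict.modify]
  set v := (fpParse lit).1 with hv
  set p := (fpParse lit).2 with hp
  by_cases ha : assignment.contains v = true
  · simp only [ha, if_true]
    exact ⟨hnd, hgood, hpure, hdel⟩
  · by_cases hc : polar.contains v = true
    · -- v already in the polarity table
      obtain ⟨s, hget⟩ : ∃ s, polar.get? v = some s := by
        rw [PySem.Dict.contains_eq_isSome_get?] at hc
        exact Option.isSome_iff_exists.mp hc
      have hmem : (v, s) ∈ polar.items := PySem.Dict.mem_items_of_get?_eq_some _ hget
      have hgs : FPGood s := hgood _ hmem
      have hgetD : polar.getD v PySem.Set.empty = s := PySem.Dict.getD_of_get?_eq_some _ _ hget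
      have huni : ∀ q ∈ polar.items, q.1 = v → q.2 = s := by
        intro q hq hq1
        have hh : polar.get? q.1 = some q.2 :=
          (PySem.Dict.get?_eq_some_iff_mem_items polar q.1 q.2 hnd).mpr (by cases q; exact hq)
        rw [hq1, hget] at hh
        injection hh with hh'
        exact hh'.symm
      have hndp : pure.keys.Nodup := fp_pure_nodup pure polar hpure hnd
      rw [hgetD]
      by_cases hps : PySem.Set.contains s p = true
      · -- polarity already recorded: both sides unchanged
        have hadd : PySem.Set.add s p = s := by
          have hmemp : p ∈ s := by simpa using hps
          simp [PySem.Set.add, hmemp]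
        have hpolar : polar.insert v (PySem.Set.add s p) = polar := by
          apply PySem.Dict.ext
          rw [hadd, PySem.Dict.items_insert_of_contains _ _ hc]
          exact fp_map_replace_self _ _ _ huni
        rw [hpolar]
        rcases hgs with hs1 | hs1 | hs1 | hs1
        · -- s = [true] and p = true
          have hp' : p = true := by
            subst hs1; simpa [PySem.Set.contains] using hps
          have hpcon : pure.contains v = true := fp_pure_contains pure polar hpure v true (hs1 ▸ hmem)
          have hgd : pure.getD v false = true :=
            PySem.Dict.getD_of_mem_items pure (by
              rw [hpure]; exact List.mem_filterMap.mpr ⟨(v, [true]), hs1 ▸ hmem, fpSel_singleton v true⟩) hndp false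
          simp only [ha, if_false, hpcon, if_true, hgd, hp', Bool.false_eq_true, bne_self_eq_false]
          exact ⟨hnd, hgood, hpure, hdel⟩
        · -- s = [false] and p = false
          have hp' : p = false := by
            subst hs1; simpa [PySem.Set.contains] using hps
          have hpcon : pure.contains v = true := fp_pure_contains pure polar hpure v false (hs1 ▸ hmem)
          have hgd : pure.getD v false = false :=
            PySem.Dict.getD_of_mem_items pure (by
              rw [hpure]; exact List.mem_filterMap.mpr ⟨(v, [false]), hs1 ▸ hmem, fpSel_singleton v false⟩) hndp false
          simp only [ha, if_false, hpcon, if_true, hgd, hp', Bool.false_eq_true, bne_self_eq_false]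
          exact ⟨hnd, hgood, hpure, hdel⟩
        · -- s has both polarities: v was deleted
          have hpcon : pure.contains v = false :=
            fp_pure_not_contains pure polar hpure hnd v s hget (by rw [hs1]; rfl)
          have hdcon : v ∈ del := (hdel v).mpr ⟨s, hget, by rw [hs1]; rfl⟩
          simp only [ha, if_false, hpcon, Bool.false_eq_true, hdcon, if_true,
            List.contains_eq_mem, decide_eq_true_eq]
          exact ⟨hnd, hgood, hpure, hdel⟩
        · have hpcon : pure.contains v = false :=
            fp_pure_not_contains pure polar hpure hnd v s hget (by rw [hs1]; rfl)
          have hdcon : v ∈ del := (hdel v).mpr ⟨s, hget, by rw [hs1]; rfl⟩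
          simp only [ha, if_false, hpcon, Bool.false_eq_true, hdcon, if_true,
            List.contains_eq_mem, decide_eq_true_eq]
          exact ⟨hnd, hgood, hpure, hdel⟩
      · -- opposite polarity arrives: conflict, A deletes, B's set grows to both
        have hs1 : s = [!p] := by
          rcases hgs with h1 | h1 | h1 | h1 <;> subst h1 <;> revert hps <;> cases p <;>
            simp [PySem.Set.contains]
        subst hs1
        have hadd : PySem.Set.add [!p] p = [!p, p] := by cases p <;> rfl
        rw [hadd]
        have hpm : (v, !p) ∈ pure.items := by
          rw [hpure]; exact List.mem_filterMap.mpr ⟨(v, [!p]), hmem, fpSel_singleton v (!p)⟩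
        have hpcon : pure.contains v = true := fp_pure_contains pure polar hpure v (!p) hmem
        have hgd : pure.getD v false = !p := PySem.Dict.getD_of_mem_items pure hpm hndp false
        have htest : (pure.getD v false != p) = true := by rw [hgd]; cases p <;> rfl
        simp only [ha, if_false, hpcon, if_true, htest, Bool.false_eq_true]
        refine ⟨PySem.Dict.nodup_keys_insert _ _ _ hnd, ?_, ?_, ?_⟩
        · intro q hq
          rw [PySem.Dict.mem_items_insert] at hq
          rcases hq with rfl | ⟨hq, -⟩
          · cases p <;> simp [FPGood]
          · exact hgood q hq
        · have herase : (pure.erase v).items = pure.items.filter (fun r => !(r.1 == v)) := rfl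
          have hsel2 : fpSel (v, [!p, p]) = none := fpSel_two v [!p, p] rfl
          rw [herase, hpure, PySem.Dict.items_insert_of_contains _ _ hc,
            fp_filterMap_replace _ _ _ hsel2]
        · intro v'
          rw [PySem.Dict.get?_insert]
          by_cases hvv : v' = v
          · subst hvv
            simp only [if_pos rfl, List.mem_append, List.mem_singleton]
            exact ⟨fun _ => ⟨[!p, p], rfl, rfl⟩, fun _ => Or.inr trivial⟩
          · simp only [if_neg hvv, List.mem_append, List.mem_singleton, hvv, or_false]
            exact hdel v'
    · -- v not seen before: B appends a fresh entry, A inserts v as pure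
      have hcf : polar.contains v = false := eq_false_of_ne_true hc
      have hget : polar.get? v = none := by
        rw [PySem.Dict.contains_eq_isSome_get?] at hcf
        cases hq : polar.get? v with
        | none => rfl
        | some s => rw [hq] at hcf; simp at hcf
      have hvk : v ∉ polar.keys := by
        rw [PySem.Dict.contains_eq_decide_mem_keys] at hcf
        simpa using hcf
      have hgetD : polar.getD v PySem.Set.empty = PySem.Set.empty :=
        PySem.Dict.getD_of_not_contains polar _ hcf
      have hadd : PySem.Set.add (PySem.Set.empty : PySem.Set Bool) p = [p] := rfl
      have hpc : pure.contains v = false := by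
        rw [PySem.Dict.contains_eq_decide_mem_keys]
        simp only [decide_eq_false_iff_not, PySem.Dict.keys, List.mem_map]
        rintro ⟨r, hr, hr1⟩
        apply hvk
        rw [hpure] at hr
        obtain ⟨q, hq, hsel⟩ := List.mem_filterMap.mp hr
        have hq1 : q.1 = v := by rw [← (fpSel_eq_some hsel).1, hr1]
        have hvm : v ∈ polar.items.map Prod.fst := List.mem_map.mpr ⟨q, hq, hq1⟩
        simpa [PySem.Dict.keys] using hvm
      have hdc : v ∉ del := by
        rw [hdel v]
        rintro ⟨s, hs, -⟩
        rw [hget] at hs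
        cases hs
      have hdc' : del.contains v = false := by
        simp [List.contains_eq_mem, hdc]
      rw [hgetD, hadd]
      simp only [ha, if_false, hpc, Bool.false_eq_true, hdc', if_true]
      refine ⟨PySem.Dict.nodup_keys_insert _ _ _ hnd, ?_, ?_, ?_⟩
      · intro q hq
        rw [PySem.Dict.mem_items_insert] at hq
        rcases hq with rfl | ⟨hq, -⟩
        · cases p <;> simp [FPGood]
        · exact hgood q hq
      · rw [PySem.Dict.items_insert_of_not_contains _ _ hcf,
          PySem.Dict.items_insert_of_not_contains _ _ hpc,
          List.filterMap_append, hpure]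
        simp [fpSel_singleton]
      · intro v'
        rw [PySem.Dict.get?_insert]
        by_cases hvv : v' = v
        · subst hvv
          simp only [if_pos rfl]
          constructor
          · intro hmem'; exact absurd hmem' hdc
          · rintro ⟨s, hs, hlen⟩
            injection hs with hs'
            rw [← hs'] at hlen
            simp at hlen
        · simp only [if_neg hvv]
          exact hdel v'

lemma fpFold_clause_inv (assignment : List String) (L : List String)
    (st : PySem.Dict String Bool × List String) (polar : PySem.Dict String (PySem.Set Bool))
    (h : FPInv st polar) :
    FPInv (L.foldl (fpStepA assignment) st) (L.foldl (fpStepB assignment) polar) := by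
  induction L generalizing st polar with
  | nil => exact h
  | cons lit L ih => exact ih _ _ (fpStep_inv assignment st polar lit h)

lemma fpFold_clauses_inv (assignment : List String) (clauses : List (List String))
    (st : PySem.Dict String Bool × List String) (polar : PySem.Dict String (PySem.Set Bool))
    (h : FPInv st polar) :
    FPInv (clauses.foldl (fun st clause => clause.foldl (fpStepA assignment) st) st)
      (clauses.foldl (fun d clause => clause.foldl (fpStepB assignment) d) polar) := by
  induction clauses generalizing st polar with
  | nil => exact h
  | cons clause clauses ih => exact ih _ _ (fpFold_clause_inv assignment clause st polar h)

lemma fpInv_init : FPInv (PySem.Dict.empty, ([] : List String)) PySem.Dict.empty := by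
  refine ⟨by simp [PySem.Dict.keys_empty], by simp [PySem.Dict.empty], by simp [PySem.Dict.empty], ?_⟩
  intro v
  simp [PySem.Dict.get?_empty]

-- ===== VERDICT (by name: the statement is the Claim_ definition above) =====
theorem find_pure_spec : Claim_equal_find_pure := by
  intro clauses assignment _ _
  unfold Spec_find_pure find_pure find_pure_alt
  exact (fpFold_clauses_inv assignment clauses _ _ fpInv_init).2.2.1
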